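-- pv_equiv track=rewrite | github.com/deno78/atcoder | src/atcoder/ABC414/abc414_c.py | is_palindrome_base_n
-- ===== SOURCE A (Python) =====
-- def is_palindrome_base_n(x, n):
--     digits = []
--     if x == 0:
--         return True
--     while x > 0:
--         digits.append(x % n)
--         x //= n
--     return digits == digits[::-1]
-- ===== SOURCE B (Python) =====
-- def is_palindrome_base_n(x, n):
--     if x <= 0:
--         return True
--     if n < 2:
--         raise ValueError("base must be >= 2")
--     # count the digits of x in base n
--     k = 0
--     p = 1
--     while p <= x:
--         p *= n
--         k += 1
--     # two-pointer comparison of digit positions, no digit list materialised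
--     for i in range(k // 2):
--         if x // n**i % n != x // n**(k - 1 - i) % n:
--             return False
--     return True
-- ===== Notes on version B (the rewrite author's own statement) =====
-- stated objective: alternative
-- what changed: B never materialises the digit list: it first counts the digits k by growing a power of n, then compares digit positions i and k-1-i directly (two pointers over digit positions, extracting each digit arithmetically as x//n**i%n), and it rejects bases below 2 with a ValueError instead of inheriting A's accidental behaviour there.
-- outside the precondition, e.g. on is_palindrome_base_n(5, -2): A returns True, B raises ValueError; on is_palindrome_base_n(5, 0): A raises ZeroDivisionError, B raises ValueError; on is_palindrome_base_n(5, 1): A does not finish within the time limit, B raises ValueError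
import Mathlib
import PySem

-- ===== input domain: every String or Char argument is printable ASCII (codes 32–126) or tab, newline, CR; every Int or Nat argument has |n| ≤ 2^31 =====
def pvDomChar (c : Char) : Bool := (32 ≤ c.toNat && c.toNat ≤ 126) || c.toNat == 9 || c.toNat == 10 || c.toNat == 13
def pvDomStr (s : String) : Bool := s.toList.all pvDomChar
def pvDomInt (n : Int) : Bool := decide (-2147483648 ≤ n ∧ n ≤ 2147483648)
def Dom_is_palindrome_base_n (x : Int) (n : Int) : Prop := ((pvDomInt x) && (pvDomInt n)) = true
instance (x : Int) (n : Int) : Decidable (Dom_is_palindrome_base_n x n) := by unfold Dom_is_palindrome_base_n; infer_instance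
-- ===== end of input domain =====

-- B builds no digit list: it counts the digits and compares digit positions i and k-1-i
-- arithmetically (objective: alternative algorithm, O(1) extra space).

-- ===== PORT A =====
-- the while loop of A, fuel-bounded (fuel = bitLength x + 1 bounds the iteration count on every admitted input)
def pvALoop (n : Int) (fuel : Nat) (x : Int) (digits : List Int) : List Int :=
  match fuel with
  | 0 => digits
  | fuel + 1 =>
      if 0 < x then pvALoop n fuel (PySem.Int.floordiv x n) (digits ++ [PySem.Int.mod x n])
      else digits

def is_palindrome_base_n (x : Int) (n : Int) : Bool :=
  if x = 0 then true
  else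
    let digits := pvALoop n (PySem.Int.bitLength x + 1) x []
    digits == digits.reverse   -- digits[::-1] is the full reversed copy

-- ===== PORT B =====
-- the digit-counting loop of B: while p <= x: p *= n; k += 1   (fuel = bitLength x + 1 bounds the iterations)
def pvCountLoop (x : Int) (n : Int) (fuel : Nat) (p : Int) (k : Int) : Int :=
  match fuel with
  | 0 => k
  | fuel + 1 => if p ≤ x then pvCountLoop x n fuel (p * n) (k + 1) else k

-- Source B raises ValueError on x > 0 with n < 2; those inputs are outside Pre_ below,
-- so the port carries only the returning branches.
def is_palindrome_base_n_alt (x : Int) (n : Int) : Bool :=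
  if x ≤ 0 then true
  else
    let k := pvCountLoop x n (PySem.Int.bitLength x + 1) 1 0
    (PySem.List.pyRange 0 (PySem.Int.floordiv k 2) 1).all (fun i =>
      PySem.Int.mod (PySem.Int.floordiv x (n ^ i.toNat)) n
        == PySem.Int.mod (PySem.Int.floordiv x (n ^ (k - 1 - i).toNat)) n)

-- ===== PRECONDITION & SPEC =====
-- Pre_ excludes x > 0 with n < 2: there A raises ZeroDivisionError (n = 0), loops forever
-- (n = 1), or returns an accidental True for a meaningless negative base (n ≤ -1, one loop
-- iteration) — and B itself raises ValueError on every such input, since a base below 2 is invalid.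
def Pre_is_palindrome_base_n (x : Int) (n : Int) : Prop := x ≤ 0 ∨ 2 ≤ n
instance (x : Int) (n : Int) : Decidable (Pre_is_palindrome_base_n x n) := by
  unfold Pre_is_palindrome_base_n; infer_instance

def pvWitness_is_palindrome_base_n : Int × Int := (121, 10)

def Spec_is_palindrome_base_n (x : Int) (n : Int) (out : Bool) : Prop := out = is_palindrome_base_n_alt x n
instance (x : Int) (n : Int) (out : Bool) : Decidable (Spec_is_palindrome_base_n x n out) := by unfold Spec_is_palindrome_base_n; infer_instance

-- ===== CLAIM (what is proved, stated in full; the proofs are below) =====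
def Claim_equal_is_palindrome_base_n : Prop := ∀ (x : Int) (n : Int), Dom_is_palindrome_base_n x n → Pre_is_palindrome_base_n x n → Spec_is_palindrome_base_n x n (is_palindrome_base_n x n)

-- ===== LEMMAS AND PROOFS =====

theorem pv_ediv_lt (x n : Int) (hx : 0 < x) (hn : 2 ≤ n) :
    0 ≤ x / n ∧ x / n < x := by
  constructor
  · exact Int.ediv_nonneg (by omega) (by omega)
  · have h1 := Int.mul_ediv_add_emod x n
    have h2 := Int.emod_nonneg x (show n ≠ 0 by omega)
    have h3 : 0 ≤ x / n := Int.ediv_nonneg (by omega) (by omega)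
    nlinarith

-- number of base-n digits of x (0 for x ≤ 0)
def pvNumDig (n : Int) (x : Int) : Nat :=
  if h : 0 < x ∧ 2 ≤ n then pvNumDig n (x / n) + 1 else 0
termination_by x.toNat
decreasing_by
  have := pv_ediv_lt x n h.1 h.2
  omega

theorem pvNumDig_pos (n x : Int) (hx : 0 < x) (hn : 2 ≤ n) :
    pvNumDig n x = pvNumDig n (x / n) + 1 := by
  rw [pvNumDig]; simp [hx, hn]

theorem pvNumDig_nonpos (n x : Int) (hx : ¬ 0 < x) :
    pvNumDig n x = 0 := by
  rw [pvNumDig]; simp [hx]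

theorem pvNumDig_iff (n : Int) (hn : 2 ≤ n) : ∀ (t : Nat) (x : Int), x.toNat ≤ t →
    ∀ m : Nat, (x < n ^ m ↔ pvNumDig n x ≤ m) := by
  intro t
  induction t with
  | zero =>
      intro x ht m
      have hx : ¬ 0 < x := by omega
      rw [pvNumDig_nonpos n x hx]
      have : (0:Int) < n ^ m := pow_pos (by omega) m
      constructor <;> intro <;> omega
  | succ t ih =>
      intro x ht m
      by_cases hx : 0 < x
      · rw [pvNumDig_pos n x hx hn]
        have hd := pv_ediv_lt x n hx hn
        cases m with
        | zero =>
            simp only [pow_zero]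
            have hnd : 1 ≤ pvNumDig n (x / n) + 1 := by omega
            constructor <;> intro h <;> omega
        | succ m =>
            have hih := ih (x / n) (by omega) m
            have hiff : x < n ^ (m + 1) ↔ x / n < n ^ m := by
              rw [pow_succ]
              constructor
              · intro h
                exact Int.ediv_lt_of_lt_mul (by omega) (by linarith)
              · intro h
                calc x < (x / n + 1) * n := by
                        have h1 := Int.mul_ediv_add_emod x n
                        have h2 := Int.emod_lt_of_pos x (show (0:Int) < n by omega)
                        nlinarith
                  _ ≤ n ^ m * n := by
                        have : x / n + 1 ≤ n ^ m := by omega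
                        nlinarith [pow_pos (show (0:Int) < n by omega) m]
            rw [hiff, hih]
            omega
      · rw [pvNumDig_nonpos n x hx]
        have : (0:Int) < n ^ m := pow_pos (by omega) m
        constructor <;> intro <;> omega

theorem pvALoop_acc (n : Int) (fuel : Nat) : ∀ (x : Int) (acc : List Int),
    pvALoop n fuel x acc = acc ++ pvALoop n fuel x [] := by
  induction fuel with
  | zero => intro x acc; simp [pvALoop]
  | succ f ih =>
      intro x acc
      simp only [pvALoop]
      split_ifs with h
      · rw [ih _ (acc ++ _), ih _ ([] ++ _)]; simp
      · simp

-- A's digit list is the map of the digit-extraction formula over the digit positions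
theorem pvALoop_eq_map (n : Int) (hn : 2 ≤ n) : ∀ (fuel : Nat) (x : Int),
    pvNumDig n x < fuel →
    pvALoop n fuel x [] = (List.range (pvNumDig n x)).map (fun i => x / n ^ i % n) := by
  intro fuel
  induction fuel with
  | zero => intro x h; omega
  | succ f ih =>
      intro x hf
      simp only [pvALoop]
      split_ifs with hx
      · have hd := pv_ediv_lt x n hx hn
        rw [pvALoop_acc, PySem.Int.floordiv_eq_ediv_of_pos (by omega),
            PySem.Int.mod_eq_emod_of_pos (by omega)]
        rw [ih (x / n) (by rw [pvNumDig_pos n x hx hn] at hf; omega)]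
        rw [pvNumDig_pos n x hx hn, List.range_succ_eq_map]
        simp only [List.nil_append, List.singleton_append, List.map_cons, List.map_map]
        congr 1
        · simp
        · apply List.map_congr_left
          intro i _
          simp only [Function.comp]
          rw [Int.ediv_ediv_of_nonneg (by omega), ← pow_succ']
      · rw [pvNumDig_nonpos n x hx]; simp

-- B's counting loop computes pvNumDig
theorem pvCountLoop_eq (x n : Int) (hn : 2 ≤ n) : ∀ (fuel : Nat) (j : Nat),
    j ≤ pvNumDig n x → pvNumDig n x - j ≤ fuel →
    pvCountLoop x n fuel (n ^ j) (j : Int) = (pvNumDig n x : Int) := by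
  have hiff := pvNumDig_iff n hn x.toNat x (le_refl _)
  intro fuel
  induction fuel with
  | zero =>
      intro j hj hf
      have : j = pvNumDig n x := by omega
      simp [pvCountLoop, this]
  | succ f ih =>
      intro j hj hf
      simp only [pvCountLoop]
      split_ifs with h
      · have hlt : j < pvNumDig n x := by
          by_contra hc
          have : x < n ^ j := (hiff j).mpr (by omega)
          omega
        have := ih (j + 1) (by omega) (by omega)
        rw [pow_succ] at this
        push_cast at this ⊢
        exact this
      · have : pvNumDig n x ≤ j := (hiff j).mp (by omega)
        have : j = pvNumDig n x := by omega
        simp [this]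

-- half-range characterisation of list palindromes
theorem pv_palindrome_iff (L : List Int) :
    (L = L.reverse) ↔ ∀ i, i < L.length / 2 → L[i]? = L[L.length - 1 - i]? := by
  constructor
  · intro h i hi
    conv_lhs => rw [h]
    exact List.getElem?_reverse (by omega)
  · intro h
    apply List.ext_getElem?
    intro i
    by_cases hi : i < L.length
    · rw [List.getElem?_reverse hi]
      set len := L.length with hlen
      by_cases h1 : i < len / 2
      · exact h i h1
      · by_cases h2 : len - 1 - i < len / 2
        · have := h (len - 1 - i) h2
          rw [this]
          congr 1
          omega
        · congr 1
          omega
    · rw [List.getElem?_eq_none (by omega), List.getElem?_eq_none (by simp; omega)]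

-- digit extraction at an index of A's digit list
theorem pv_dig_get (x n : Int) (d j : Nat) (hj : j < d) :
    ((List.range d).map (fun i => x / n ^ i % n))[j]? = some (x / n ^ j % n) := by
  rw [List.getElem?_map, List.getElem?_range hj]; rfl

-- A's list-palindrome test equals B's indexed half-scan, for the same digit count d
theorem pv_iff (x n : Int) (hn : 2 ≤ n) (d : Nat) :
    (((List.range d).map (fun i => x / n ^ i % n))
        == ((List.range d).map (fun i => x / n ^ i % n)).reverse)
    = ((List.range (d / 2)).map (fun k : Nat => (k : Int))).all (fun i =>
        PySem.Int.mod (PySem.Int.floordiv x (n ^ i.toNat)) n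
          == PySem.Int.mod (PySem.Int.floordiv x (n ^ (((d : Int)) - 1 - i).toNat)) n) := by
  rw [Bool.eq_iff_iff, beq_iff_eq, List.all_eq_true, pv_palindrome_iff]
  simp only [List.length_map, List.length_range]
  constructor
  · intro h i hmem
    obtain ⟨j, hj, rfl⟩ := List.mem_map.mp hmem
    have hjd : j < d / 2 := List.mem_range.mp hj
    have hh := h j hjd
    rw [pv_dig_get x n d j (by omega), pv_dig_get x n d (d - 1 - j) (by omega)] at hh
    have heq : x / n ^ j % n = x / n ^ (d - 1 - j) % n := by simpa using hh
    rw [beq_iff_eq]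
    have ht1 : ((j : Int)).toNat = j := by omega
    have ht2 : ((d : Int) - 1 - (j : Int)).toNat = d - 1 - j := by omega
    rw [ht1, ht2,
        PySem.Int.floordiv_eq_ediv_of_pos (pow_pos (by omega : (0:Int) < n) _),
        PySem.Int.floordiv_eq_ediv_of_pos (pow_pos (by omega : (0:Int) < n) _),
        PySem.Int.mod_eq_emod_of_pos (by omega),
        PySem.Int.mod_eq_emod_of_pos (by omega)]
    exact heq
  · intro h i hi
    have hmem : ((i : Int)) ∈ (List.range (d / 2)).map (fun k : Nat => (k : Int)) :=
      List.mem_map.mpr ⟨i, List.mem_range.mpr hi, rfl⟩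
    have hh := h _ hmem
    rw [beq_iff_eq] at hh
    have ht1 : ((i : Int)).toNat = i := by omega
    have ht2 : ((d : Int) - 1 - (i : Int)).toNat = d - 1 - i := by omega
    rw [ht1, ht2,
        PySem.Int.floordiv_eq_ediv_of_pos (pow_pos (by omega : (0:Int) < n) _),
        PySem.Int.floordiv_eq_ediv_of_pos (pow_pos (by omega : (0:Int) < n) _),
        PySem.Int.mod_eq_emod_of_pos (by omega),
        PySem.Int.mod_eq_emod_of_pos (by omega)] at hh
    rw [pv_dig_get x n d i (by omega), pv_dig_get x n d (d - 1 - i) (by omega)]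
    exact congrArg some hh

-- main agreement for x > 0, n >= 2
theorem pv_main (x n : Int) (hx : 0 < x) (hn : 2 ≤ n) :
    is_palindrome_base_n x n = is_palindrome_base_n_alt x n := by
  unfold is_palindrome_base_n is_palindrome_base_n_alt
  rw [if_neg (by omega), if_neg (by omega)]
  have hblen : pvNumDig n x ≤ PySem.Int.bitLength x := by
    refine (pvNumDig_iff n hn x.toNat x (le_refl _) (PySem.Int.bitLength x)).mp ?_
    have h1 : x.natAbs < 2 ^ PySem.Int.bitLength x := PySem.Int.lt_two_pow_bitLength x
    have h2 : x < (2 : Int) ^ PySem.Int.bitLength x := by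
      have := Int.le_natAbs (a := x)
      exact_mod_cast lt_of_le_of_lt this (by exact_mod_cast h1)
    calc x < (2 : Int) ^ PySem.Int.bitLength x := h2
      _ ≤ n ^ PySem.Int.bitLength x := pow_le_pow_left₀ (by omega) (by omega) _
  have hk : pvCountLoop x n (PySem.Int.bitLength x + 1) 1 0 = ((pvNumDig n x : Nat) : Int) := by
    have := pvCountLoop_eq x n hn (PySem.Int.bitLength x + 1) 0 (by omega) (by omega)
    simpa using this
  have hL := pvALoop_eq_map n hn (PySem.Int.bitLength x + 1) x (by omega)
  have hk2 : PySem.Int.floordiv ((pvNumDig n x : Nat) : Int) 2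
      = ((pvNumDig n x / 2 : Nat) : Int) := by
    rw [PySem.Int.floordiv_eq_ediv_of_pos (by omega)]
    omega
  simp only [hL, hk, hk2, PySem.List.pyRange_zero_natCast]
  exact pv_iff x n hn (pvNumDig n x)

-- ===== VERDICT (by name: the statement is the Claim_ definition above) =====
theorem is_palindrome_base_n_spec : Claim_equal_is_palindrome_base_n := by
  intro x n _ hpre
  unfold Pre_is_palindrome_base_n at hpre
  by_cases hx : x ≤ 0
  · unfold Spec_is_palindrome_base_n is_palindrome_base_n is_palindrome_base_n_alt
    rw [if_pos hx]
    by_cases h0 : x = 0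
    · simp [h0]
    · rw [if_neg h0]
      simp [pvALoop, show ¬ (0:Int) < x by omega]
  · have hn : 2 ≤ n := by omega
    exact pv_main x n (by omega) hn
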